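-- pv_equiv track=rewrite | github.com/sagarmanchakatla/DSA_python | questions/Strings/LargestOddNumberinString.py | calculate
-- ===== SOURCE A (Python) =====
-- def calculate(nums):
--     c = None
--
--     if int(nums[len(nums)-1]) % 2 != 0:
--         return nums
--
--
--     for i in nums:
--         if int(i)%2 != 0:
--             c = max(c, int(i)) if c is not None else int(i)
--
--     return str(c) if c is not None else ""
-- ===== SOURCE B (Python) =====
-- def calculate(nums):
--     if int(nums[len(nums)-1]) % 2 != 0:
--         return nums
--     for d in "97531":
--         if d in nums:
--             return d
--     return ""
-- ===== Notes on version B (the rewrite author's own statement) =====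
-- stated objective: alternative
-- what changed: Replaces the running-max accumulation over int-converted characters by a descending existence probe: after the same last-digit guard, B returns the highest odd digit character that occurs in the string (probing candidates from high to low), or an empty result if none occurs.
import Mathlib
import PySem

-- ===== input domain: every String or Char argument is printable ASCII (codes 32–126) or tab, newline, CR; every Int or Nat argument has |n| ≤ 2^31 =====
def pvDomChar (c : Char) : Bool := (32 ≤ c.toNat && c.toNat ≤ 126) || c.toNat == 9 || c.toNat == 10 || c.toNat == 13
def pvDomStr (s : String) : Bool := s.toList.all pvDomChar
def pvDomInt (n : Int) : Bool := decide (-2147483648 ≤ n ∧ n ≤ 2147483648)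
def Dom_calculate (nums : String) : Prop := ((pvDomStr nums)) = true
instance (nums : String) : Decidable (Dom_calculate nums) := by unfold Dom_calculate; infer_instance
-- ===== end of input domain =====

-- B replaces A's running-max over int-converted characters by a descending existence
-- probe over the odd digit characters ('9' down to '1'); same return value wherever A returns.

-- ===== PORT A =====
def calculate (nums : String) : String :=
  let l := nums.toList
  match PySem.List.pyGet? l ((l.length : Int) - 1) with
  | none => ""  -- IndexError on empty input; excluded by Pre_
  | some ch =>
    match PySem.Int.ofChars? [ch] with
    | none => ""  -- ValueError; excluded by Pre_
    | some v =>
      if PySem.Int.mod v 2 ≠ 0 then nums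
      else
        let c := l.foldl (fun c i =>
          match PySem.Int.ofChars? [i] with
          | none => c  -- ValueError site; excluded by Pre_
          | some w =>
            if PySem.Int.mod w 2 ≠ 0 then
              (match c with | none => some w | some c0 => some (max c0 w))
            else c) (none : Option Int)
        match c with
        | some m => PySem.Int.toStr m
        | none => ""

-- ===== PORT B =====
-- B-side helper: probe the candidate odd digit characters in descending order
def probeOdd (l : List Char) : List Char → String
  | [] => ""
  | d :: ds => if PySem.Chars.isIn [d] l then String.ofList [d] else probeOdd l ds

def calculate_alt (nums : String) : String :=
  let l := nums.toList
  match PySem.List.pyGet? l ((l.length : Int) - 1) with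
  | none => ""  -- IndexError on empty input; excluded by Pre_
  | some ch =>
    match PySem.Int.ofChars? [ch] with
    | none => ""  -- ValueError; excluded by Pre_
    | some v =>
      if PySem.Int.mod v 2 ≠ 0 then nums
      else probeOdd l ("97531".toList)

-- ===== PRECONDITION & SPEC =====
-- Pre_ excludes exactly the inputs where A raises (within Dom): the empty string
-- (IndexError), a non-digit last character (ValueError in the guard), and — when the
-- last digit is even — any non-digit character (ValueError in the scanning loop).
def Pre_calculate (nums : String) : Prop :=
  nums.toList ≠ [] ∧ nums.toList.getLast!.isDigit = true ∧
  (nums.toList.getLast!.toNat % 2 = 1 ∨ nums.toList.all (fun c => c.isDigit) = true)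
instance (nums : String) : Decidable (Pre_calculate nums) := by unfold Pre_calculate; infer_instance

def pvWitness_calculate : String := "3452"

def Spec_calculate (nums : String) (out : String) : Prop := out = calculate_alt nums
instance (nums : String) (out : String) : Decidable (Spec_calculate nums out) := by unfold Spec_calculate; infer_instance

-- ===== CLAIM (what is proved, stated in full; the proofs are below) =====
def Claim_equal_calculate : Prop := ∀ (nums : String), Dom_calculate nums → Pre_calculate nums → Spec_calculate nums (calculate nums)

-- ===== LEMMAS AND PROOFS =====

-- option-max: the combining operation behind A's accumulator `c`
def omax : Option Int → Option Int → Option Int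
  | none, b => b
  | some x, none => some x
  | some x, some y => some (max x y)

-- A's loop body, named
def stepA (c : Option Int) (i : Char) : Option Int :=
  match PySem.Int.ofChars? [i] with
  | none => c
  | some w =>
    if PySem.Int.mod w 2 ≠ 0 then
      (match c with | none => some w | some c0 => some (max c0 w))
    else c

-- the common value both programs compute: highest odd digit present, as an option
def oddN (l : List Char) : Option Int :=
  if '9' ∈ l then some 9 else if '7' ∈ l then some 7 else if '5' ∈ l then some 5
  else if '3' ∈ l then some 3 else if '1' ∈ l then some 1 else none

lemma omax_assoc (a b c : Option Int) : omax (omax a b) c = omax a (omax b c) := by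
  cases a <;> cases b <;> cases c <;> simp [omax, max_assoc]

lemma digit_cases (c : Char) (h : c.isDigit = true) :
    c = '0' ∨ c = '1' ∨ c = '2' ∨ c = '3' ∨ c = '4' ∨ c = '5' ∨ c = '6' ∨ c = '7' ∨ c = '8' ∨ c = '9' := by
  simp [Char.isDigit] at h
  obtain ⟨h1, h2⟩ := h
  have h1' : 48 ≤ c.toNat := by exact_mod_cast h1
  have h2' : c.toNat ≤ 57 := by exact_mod_cast h2
  have h3 : c = Char.ofNat c.toNat := (Char.ofNat_toNat c).symm
  interval_cases h4 : c.toNat <;> rw [h3] <;> decide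

lemma ofChars_digit (c : Char) (h : c.isDigit = true) :
    PySem.Int.ofChars? [c] = some ((c.toNat : Int) - 48) := by
  rcases digit_cases c h with h'|h'|h'|h'|h'|h'|h'|h'|h'|h' <;> subst h' <;> decide

lemma oddN_cons_even (i : Char) (t : List Char) (h : i.isDigit = true) (he : i.toNat % 2 = 0) :
    oddN (i :: t) = oddN t := by
  rcases digit_cases i h with h'|h'|h'|h'|h'|h'|h'|h'|h'|h' <;> subst h' <;>
    first
      | (exact absurd he (by decide))
      | (simp [oddN, List.mem_cons])

lemma oddN_cons_odd (i : Char) (t : List Char) (h : i.isDigit = true) (ho : i.toNat % 2 = 1) :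
    oddN (i :: t) = omax (some ((i.toNat : Int) - 48)) (oddN t) := by
  rcases digit_cases i h with h'|h'|h'|h'|h'|h'|h'|h'|h'|h' <;> subst h' <;>
    first
      | (exact absurd ho (by decide))
      | (simp only [oddN, List.mem_cons]; norm_num; split_ifs <;> simp_all [omax])

lemma stepA_digit (c : Option Int) (i : Char) (h : i.isDigit = true) :
    stepA c i = if i.toNat % 2 = 1 then omax c (some ((i.toNat : Int) - 48)) else c := by
  unfold stepA
  rw [ofChars_digit i h]
  cases c <;> simp [omax] <;> split_ifs <;> first | rfl | omega

lemma fold_stepA (l : List Char) (h : ∀ c ∈ l, c.isDigit = true) :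
    ∀ acc, l.foldl stepA acc = omax acc (oddN l) := by
  induction l with
  | nil => intro acc; cases acc <;> simp [oddN, omax]
  | cons i t ih =>
    intro acc
    have hi := h i (by simp)
    have ht : ∀ c ∈ t, c.isDigit = true := fun c hc => h c (by simp [hc])
    rw [List.foldl_cons, ih ht, stepA_digit _ _ hi]
    by_cases hp : i.toNat % 2 = 1
    · rw [if_pos hp, omax_assoc, oddN_cons_odd i t hi hp]
    · have he : i.toNat % 2 = 0 := by omega
      rw [if_neg hp, oddN_cons_even i t hi he]

lemma isIn_singleton (d : Char) (l : List Char) : PySem.Chars.isIn [d] l = true ↔ d ∈ l := by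
  rw [PySem.Chars.isIn_iff_infix]; exact List.singleton_infix_iff d l

lemma probe_eq (l : List Char) :
    probeOdd l ("97531".toList) =
      (match oddN l with | some m => PySem.Int.toStr m | none => "") := by
  show probeOdd l ['9', '7', '5', '3', '1'] = _
  simp only [probeOdd, oddN, isIn_singleton]
  split_ifs <;> rfl

-- ===== VERDICT (by name: the statement is the Claim_ definition above) =====
theorem calculate_spec : Claim_equal_calculate := by
  intro nums _ hpre
  obtain ⟨hne, hld, hcase⟩ := hpre
  unfold Spec_calculate calculate calculate_alt
  have hlen : 0 < nums.toList.length := List.length_pos_iff.mpr hne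
  have hget : PySem.List.pyGet? nums.toList ((nums.toList.length : Int) - 1)
      = some nums.toList.getLast! := by
    have h0 : (0 : Int) ≤ (nums.toList.length : Int) - 1 := by omega
    rw [PySem.List.pyGet?_of_nonneg _ h0]
    have h1 : ((nums.toList.length : Int) - 1).toNat = nums.toList.length - 1 := by omega
    rw [h1, ← List.getLast?_eq_getElem?]
    cases hl : nums.toList.getLast? with
    | none => exact absurd (List.getLast?_eq_none_iff.mp hl) hne
    | some x => rw [List.getLast!_of_getLast? hl]
  simp only [hget, ofChars_digit _ hld]
  by_cases hcnd : PySem.Int.mod ((nums.toList.getLast!.toNat : Int) - 48) 2 ≠ 0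
  · rw [if_pos hcnd, if_pos hcnd]
  · rw [if_neg hcnd, if_neg hcnd]
    have hall : ∀ c ∈ nums.toList, c.isDigit = true := by
      rcases hcase with ho | hall
      · exfalso
        rw [PySem.Int.mod_eq_emod_of_pos (by norm_num)] at hcnd
        omega
      · simpa [List.all_eq_true] using hall
    rw [show (fun (c : Option Int) (i : Char) =>
          match PySem.Int.ofChars? [i] with
          | none => c
          | some w =>
            if PySem.Int.mod w 2 ≠ 0 then
              (match c with | none => some w | some c0 => some (max c0 w))
            else c) = stepA from rfl]
    rw [fold_stepA nums.toList hall none, probe_eq]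
    rfl
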